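-- pv_equiv track=rewrite | github.com/ayushadarsh7/dss | script_final.py | list_to_frequency_vector
-- ===== SOURCE A (Python) =====
-- def list_to_frequency_vector(category_list, category_to_index, vector_size=122):
--     freq_vector = [0] * vector_size
--
--     for ele in category_list:
--         ele = ele.capitalize()
--         if ele in category_to_index:
--             idx = category_to_index[ele]
--             freq_vector[idx] += 1
--
--     return freq_vector
-- ===== SOURCE B (Python) =====
-- from collections import Counter
--
-- def list_to_frequency_vector(category_list, category_to_index, vector_size=122):
--     counts = Counter(ele.capitalize() for ele in category_list)
--     freq_vector = [0] * vector_size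
--     for key, idx in category_to_index.items():
--         cnt = counts.get(key, 0)
--         if cnt:
--             freq_vector[idx] += cnt
--     return freq_vector
-- ===== Notes on version B (the rewrite author's own statement) =====
-- stated objective: alternative
-- what changed: B reverses the iteration: it builds a Counter of the capitalized inputs once and then loops over the category_to_index mapping's entries, adding each category's whole count at its stored index, instead of A's loop over the input list with a mapping lookup per element.
import Mathlib
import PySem

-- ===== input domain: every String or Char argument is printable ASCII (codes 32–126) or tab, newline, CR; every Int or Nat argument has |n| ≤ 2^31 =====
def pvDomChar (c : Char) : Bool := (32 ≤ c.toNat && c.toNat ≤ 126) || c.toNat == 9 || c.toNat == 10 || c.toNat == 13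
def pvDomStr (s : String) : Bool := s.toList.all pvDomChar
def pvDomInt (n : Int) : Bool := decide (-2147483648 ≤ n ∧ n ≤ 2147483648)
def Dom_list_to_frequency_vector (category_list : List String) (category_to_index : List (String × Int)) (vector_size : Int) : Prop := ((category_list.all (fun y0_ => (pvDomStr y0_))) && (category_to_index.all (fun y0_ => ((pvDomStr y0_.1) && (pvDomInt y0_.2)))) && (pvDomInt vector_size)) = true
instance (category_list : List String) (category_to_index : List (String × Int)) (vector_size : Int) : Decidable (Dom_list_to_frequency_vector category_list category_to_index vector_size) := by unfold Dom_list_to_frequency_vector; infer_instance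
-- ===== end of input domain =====

-- B reverses the iteration: it builds a Counter of the capitalized inputs in one pass, then loops over
-- the category_to_index mapping's entries, adding each category's whole count at its stored index
-- (objective: alternative — scan-the-mapping instead of A's per-element lookup loop).

-- str.capitalize(), exact on the ASCII domain: first char uppercased, the rest lowercased
def pyCapitalize (s : String) : String :=
  match s.toList with
  | [] => s
  | c :: cs => String.mk (PySem.Chars.upperChar c :: cs.map PySem.Chars.lowerChar)

-- ===== PORT A =====
def list_to_frequency_vector (category_list : List String) (category_to_index : List (String × Int)) (vector_size : Int) : List Int :=
  category_list.foldl
    (fun freq_vector ele =>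
      let ele := pyCapitalize ele
      match category_to_index.find? (fun p => p.1 == ele) with
      | some p =>
        match PySem.List.pyGet? freq_vector p.2 with
        | some x => PySem.List.pySetD freq_vector p.2 (x + 1)
        | none => freq_vector          -- IndexError: excluded by Pre_
      | none => freq_vector)
    (List.replicate vector_size.toNat 0)

-- ===== PORT B =====
def list_to_frequency_vector_alt (category_list : List String) (category_to_index : List (String × Int)) (vector_size : Int) : List Int :=
  let counts := PySem.Dict.counter (category_list.map pyCapitalize)
  category_to_index.foldl
    (fun freq_vector kv =>
      let cnt := counts.getD kv.1 0
      if cnt ≠ 0 then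
        match PySem.List.pyGet? freq_vector kv.2 with
        | some x => PySem.List.pySetD freq_vector kv.2 (x + cnt)
        | none => freq_vector          -- IndexError: excluded by Pre_
      else freq_vector)
    (List.replicate vector_size.toNat 0)

-- ===== PRECONDITION & SPEC =====
-- Pre_ excludes (a) inputs on which the Python A raises IndexError (some element's capitalized form is
-- mapped to an index outside the frequency vector) and (b) association lists with duplicate keys, which
-- cannot arise from a Python dict — the assoc-list model's first-match order is accidental there.
def Pre_list_to_frequency_vector (category_list : List String) (category_to_index : List (String × Int)) (vector_size : Int) : Prop :=
  (category_to_index.map Prod.fst).Nodup ∧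
  ∀ ele ∈ category_list,
    ((category_to_index.find? (fun p => p.1 == pyCapitalize ele)).all
      (fun p => decide (PySem.Raise.InRange vector_size.toNat p.2))) = true
instance (category_list : List String) (category_to_index : List (String × Int)) (vector_size : Int) : Decidable (Pre_list_to_frequency_vector category_list category_to_index vector_size) := by unfold Pre_list_to_frequency_vector; infer_instance

def pvWitness_list_to_frequency_vector : List String × (List (String × Int)) × Int := (["a"], [("A", 0)], 1)

def Spec_list_to_frequency_vector (category_list : List String) (category_to_index : List (String × Int)) (vector_size : Int) (out : List Int) : Prop := out = list_to_frequency_vector_alt category_list category_to_index vector_size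
instance (category_list : List String) (category_to_index : List (String × Int)) (vector_size : Int) (out : List Int) : Decidable (Spec_list_to_frequency_vector category_list category_to_index vector_size out) := by unfold Spec_list_to_frequency_vector; infer_instance

-- ===== CLAIM (what is proved, stated in full; the proofs are below) =====
def Claim_equal_list_to_frequency_vector : Prop := ∀ (category_list : List String) (category_to_index : List (String × Int)) (vector_size : Int), Dom_list_to_frequency_vector category_list category_to_index vector_size → Pre_list_to_frequency_vector category_list category_to_index vector_size → Spec_list_to_frequency_vector category_list category_to_index vector_size (list_to_frequency_vector category_list category_to_index vector_size)

-- ===== LEMMAS AND PROOFS =====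

-- the common shape of one update: look the key up, then freq[idx] += c (no-op on lookup miss / out of range)
def pvBump (f : List Int) (d : List (String × Int)) (k : String) (c : Int) : List Int :=
  match d.find? (fun p => p.1 == k) with
  | some p =>
    match PySem.List.pyGet? f p.2 with
    | some x => PySem.List.pySetD f p.2 (x + c)
    | none => f
  | none => f

-- nat-index form of the update
def pvAddN (f : List Int) (j : Nat) (c : Int) : List Int := f.set j (f.getD j 0 + c)

theorem pvIdx_lt {n : Nat} {i : Int} {j : Nat} (h : PySem.List.pyIdx? n i = some j) : j < n := by
  unfold PySem.List.pyIdx? at h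
  split_ifs at h <;> simp_all <;> omega

theorem pvBump_eq_addN {f : List Int} {d : List (String × Int)} {k : String} {p : String × Int}
    (hp : d.find? (fun q => q.1 == k) = some p) {j : Nat}
    (hj : PySem.List.pyIdx? f.length p.2 = some j) (c : Int) :
    pvBump f d k c = pvAddN f j c := by
  have hjlt := pvIdx_lt hj
  unfold pvBump pvAddN
  rw [hp]
  simp [PySem.List.pyGet?, PySem.List.pySetD, PySem.List.pySet?, hj,
    List.getD_eq_getElem?_getD, List.getElem?_eq_getElem hjlt]

theorem pvBump_eq_self_of_none {f : List Int} {d : List (String × Int)} {k : String} {p : String × Int}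
    (hp : d.find? (fun q => q.1 == k) = some p)
    (hj : PySem.List.pyIdx? f.length p.2 = none) (c : Int) :
    pvBump f d k c = f := by
  unfold pvBump
  rw [hp]
  simp [PySem.List.pyGet?, hj]

theorem pvBump_eq_self_of_find_none {f : List Int} {d : List (String × Int)} {k : String}
    (hp : d.find? (fun q => q.1 == k) = none) (c : Int) :
    pvBump f d k c = f := by
  unfold pvBump; rw [hp]

theorem length_pvAddN (f : List Int) (j : Nat) (c : Int) : (pvAddN f j c).length = f.length := by
  simp [pvAddN]

theorem pvGetD_eq (f : List Int) (j : Nat) (hj : j < f.length) : f.getD j 0 = f[j] := by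
  rw [List.getD_eq_getElem?_getD, List.getElem?_eq_getElem hj]; rfl

theorem pvAddN_eq (f : List Int) (j : Nat) (c : Int) (hj : j < f.length) :
    pvAddN f j c = f.set j (f[j] + c) := by
  unfold pvAddN; rw [pvGetD_eq f j hj]

theorem pvAddN_zero (f : List Int) (j : Nat) : pvAddN f j 0 = f := by
  by_cases hj : j < f.length
  · rw [pvAddN_eq f j 0 hj, Int.add_zero, List.set_getElem_self]
  · simp [pvAddN, List.set_eq_of_length_le (Nat.le_of_not_lt hj)]

theorem pvBump_zero (f : List Int) (d : List (String × Int)) (k : String) :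
    pvBump f d k 0 = f := by
  rcases hp : d.find? (fun q => q.1 == k) with _ | p
  · exact pvBump_eq_self_of_find_none hp 0
  · rcases hj : PySem.List.pyIdx? f.length p.2 with _ | j
    · exact pvBump_eq_self_of_none hp hj 0
    · rw [pvBump_eq_addN hp hj, pvAddN_zero]

theorem pvAddN_comm (f : List Int) {j j' : Nat} (hj : j < f.length) (hj' : j' < f.length) (c c' : Int) :
    pvAddN (pvAddN f j c) j' c' = pvAddN (pvAddN f j' c') j c := by
  by_cases h : j = j'
  · subst h
    rw [pvAddN_eq f j c hj, pvAddN_eq f j c' hj,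
        pvAddN_eq _ j c' (by simpa using hj), pvAddN_eq _ j c (by simpa using hj),
        List.getElem_set_self, List.getElem_set_self, List.set_set, List.set_set]
    congr 1; ring
  · rw [pvAddN_eq f j c hj, pvAddN_eq f j' c' hj',
        pvAddN_eq _ j' c' (by simpa using hj'), pvAddN_eq _ j c (by simpa using hj),
        List.getElem_set_ne (by omega), List.getElem_set_ne (by omega),
        List.set_comm _ _ (by omega : j ≠ j')]

theorem pvBump_comm (f : List Int) (d : List (String × Int)) (k k' : String) (c c' : Int) :
    pvBump (pvBump f d k c) d k' c' = pvBump (pvBump f d k' c') d k c := by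
  rcases hp : d.find? (fun q => q.1 == k) with _ | p
  · rw [pvBump_eq_self_of_find_none hp, pvBump_eq_self_of_find_none hp]
  · rcases hp' : d.find? (fun q => q.1 == k') with _ | p'
    · rw [pvBump_eq_self_of_find_none hp', pvBump_eq_self_of_find_none hp']
    · rcases hj : PySem.List.pyIdx? f.length p.2 with _ | j
      · rcases hj' : PySem.List.pyIdx? f.length p'.2 with _ | j'
        · rw [pvBump_eq_self_of_none hp hj, pvBump_eq_self_of_none hp' hj',
              pvBump_eq_self_of_none hp hj]
        · rw [pvBump_eq_self_of_none hp hj, pvBump_eq_addN hp' hj',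
              pvBump_eq_self_of_none hp (by rw [length_pvAddN]; exact hj)]
      · rcases hj' : PySem.List.pyIdx? f.length p'.2 with _ | j'
        · rw [pvBump_eq_addN hp hj, pvBump_eq_self_of_none hp' hj',
              pvBump_eq_self_of_none hp' (show PySem.List.pyIdx? (pvAddN f j c).length p'.2 = none by
                rw [length_pvAddN]; exact hj'),
              pvBump_eq_addN hp hj]
        · rw [pvBump_eq_addN hp hj, pvBump_eq_addN hp' hj',
              pvBump_eq_addN hp' (show PySem.List.pyIdx? (pvAddN f j c).length p'.2 = some j' by
                rw [length_pvAddN]; exact hj'),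
              pvBump_eq_addN hp (show PySem.List.pyIdx? (pvAddN f j' c').length p.2 = some j by
                rw [length_pvAddN]; exact hj),
              pvAddN_comm f (pvIdx_lt hj) (pvIdx_lt hj')]

theorem pvAddN_add (f : List Int) (j : Nat) (c c' : Int) :
    pvAddN f j (c + c') = pvAddN (pvAddN f j c) j c' := by
  by_cases hj : j < f.length
  · rw [pvAddN_eq f j (c + c') hj, pvAddN_eq f j c hj,
        pvAddN_eq _ j c' (by simpa using hj), List.getElem_set_self, List.set_set]
    congr 1; ring
  · simp [pvAddN, List.set_eq_of_length_le (Nat.le_of_not_lt hj)]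

theorem pvBump_add (f : List Int) (d : List (String × Int)) (k : String) (c c' : Int) :
    pvBump f d k (c + c') = pvBump (pvBump f d k c) d k c' := by
  rcases hp : d.find? (fun q => q.1 == k) with _ | p
  · rw [pvBump_eq_self_of_find_none hp, pvBump_eq_self_of_find_none hp, pvBump_eq_self_of_find_none hp]
  · rcases hj : PySem.List.pyIdx? f.length p.2 with _ | j
    · rw [pvBump_eq_self_of_none hp hj, pvBump_eq_self_of_none hp hj, pvBump_eq_self_of_none hp hj]
    · rw [pvBump_eq_addN hp hj, pvBump_eq_addN hp hj,
          pvBump_eq_addN hp (by rwa [length_pvAddN]), pvAddN_add]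

theorem pvBump_foldl_comm (d : List (String × Int)) (L : List String) (cf : String → Int)
    (k : String) (c : Int) : ∀ f : List Int,
    L.foldl (fun f k' => pvBump f d k' (cf k')) (pvBump f d k c)
      = pvBump (L.foldl (fun f k' => pvBump f d k' (cf k')) f) d k c := by
  induction L with
  | nil => intro f; rfl
  | cons a t ih =>
    intro f
    simp only [List.foldl_cons]
    rw [pvBump_comm, ih]

-- pulling one occurrence of e (count bumped by 1) out of a nodup fold
theorem pv_extract (d : List (String × Int)) (e : String) :
    ∀ (s : List String), e ∈ s → s.Nodup → ∀ (cf : String → Int) (f : List Int),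
    s.foldl (fun f k => pvBump f d k (if k = e then cf k + 1 else cf k)) f
      = pvBump (s.foldl (fun f k => pvBump f d k (cf k)) f) d e 1 := by
  intro s
  induction s with
  | nil => intro h; simp at h
  | cons a t ih =>
    intro he hnd cf f
    simp only [List.foldl_cons]
    by_cases hae : a = e
    · have hat : e ∉ t := hae ▸ (List.nodup_cons.mp hnd).1
      have hstep : ∀ f' : List Int,
          t.foldl (fun f k => pvBump f d k (if k = e then cf k + 1 else cf k)) f'
            = t.foldl (fun f k => pvBump f d k (cf k)) f' := by
        intro f'
        refine PySem.List.foldl_congr_mem t _ _ f' (fun acc x hx => ?_)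
        have : x ≠ e := fun h => hat (h ▸ hx)
        simp [this]
      rw [hae, if_pos rfl, hstep, pvBump_add, pvBump_foldl_comm]
    · have het : e ∈ t := by cases he with
        | head => exact absurd rfl hae
        | tail _ h => exact h
      rw [if_neg hae, ih het (List.nodup_cons.mp hnd).2 cf (pvBump f d a (cf a))]

theorem pv_main (d : List (String × Int)) (L : List String) (f0 : List Int) :
    L.foldl (fun f k => pvBump f d k 1) f0
      = (PySem.Set.ofList L).foldl (fun f k => pvBump f d k (L.count k)) f0 := by
  induction L using List.reverseRecOn with
  | nil => rfl
  | append_singleton L e ih =>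
    have hset : PySem.Set.ofList (L ++ [e]) = PySem.Set.add (PySem.Set.ofList L) e := by
      simp [PySem.Set.ofList, List.foldl_append]
    have hcount : ∀ k : String, (((L ++ [e]).count k : Int))
        = if k = e then (L.count k : Int) + 1 else (L.count k : Int) := by
      intro k
      rw [List.count_append, List.count_singleton']
      by_cases h : k = e
      · subst h; simp
      · simp [h, Ne.symm h]
    rw [hset, List.foldl_append, List.foldl_cons, List.foldl_nil, ih]
    by_cases he : e ∈ L
    · have hmem : e ∈ PySem.Set.ofList L := (PySem.Set.mem_ofList L e).mpr he
      have hadd : PySem.Set.add (PySem.Set.ofList L) e = PySem.Set.ofList L := by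
        unfold PySem.Set.add
        rw [if_pos ((PySem.Set.contains_iff _ _).mpr hmem)]
      rw [hadd,
        PySem.List.foldl_congr_mem (PySem.Set.ofList L)
          (fun f k => pvBump f d k ((L ++ [e]).count k))
          (fun f k => pvBump f d k (if k = e then (L.count k : Int) + 1 else (L.count k : Int))) f0
          (fun acc x _ => by simp only [hcount])]
      exact (pv_extract d e (PySem.Set.ofList L) hmem (PySem.Set.nodup_ofList L)
        (fun k => (L.count k : Int)) f0).symm
    · have hnmem : e ∉ PySem.Set.ofList L := fun h => he ((PySem.Set.mem_ofList L e).mp h)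
      have hadd : PySem.Set.add (PySem.Set.ofList L) e = PySem.Set.ofList L ++ [e] := by
        unfold PySem.Set.add
        rw [if_neg (fun h => hnmem ((PySem.Set.contains_iff _ _).mp h))]
      rw [hadd, List.foldl_append, List.foldl_cons, List.foldl_nil,
        PySem.List.foldl_congr_mem (PySem.Set.ofList L)
          (fun f k => pvBump f d k ((L ++ [e]).count k))
          (fun f k => pvBump f d k ((L.count k : Int))) f0
          (fun acc x hx => by
            have hxL : x ∈ L := (PySem.Set.mem_ofList L x).mp hx
            have hxe : x ≠ e := fun h => he (h ▸ hxL)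
            simp only [hcount]; rw [if_neg hxe]),
        show (((L ++ [e]).count e : Int)) = 1 by
          rw [hcount e, if_pos rfl, List.count_eq_zero.mpr he]; simp]

-- with nodup keys, find? of a member's key returns exactly that pair
theorem pv_find_of_mem {d : List (String × Int)} (hnd : (d.map Prod.fst).Nodup)
    {kv : String × Int} (hkv : kv ∈ d) : d.find? (fun p => p.1 == kv.1) = some kv := by
  induction d with
  | nil => simp at hkv
  | cons a t ih =>
    rw [List.map_cons, List.nodup_cons] at hnd
    cases hkv with
    | head => exact List.find?_cons_of_pos (by simp)
    | tail _ hmem =>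
      have hne : a.1 ≠ kv.1 := fun h =>
        hnd.1 (h ▸ (List.mem_map.mpr ⟨kv, hmem, rfl⟩))
      rw [List.find?_cons_of_neg (by simp [hne])]
      exact ih hnd.2 hmem

-- a fold whose step is the identity off p folds only over the filtered list
theorem pv_foldl_filter (op : List Int → String → List Int) (p : String → Bool) :
    ∀ (s : List String), (∀ k ∈ s, p k = false → ∀ f, op f k = f) →
    ∀ z, s.foldl op z = (s.filter p).foldl op z := by
  intro s
  induction s with
  | nil => intro _ z; rfl
  | cons a t ih =>
    intro h z
    rcases hp : p a with _ | _
    · rw [List.foldl_cons, List.filter_cons_of_neg (by simp [hp]),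
          h a List.mem_cons_self hp z]
      exact ih (fun k hk => h k (List.mem_cons_of_mem a hk)) z
    · rw [List.foldl_cons, List.filter_cons_of_pos hp, List.foldl_cons]
      exact ih (fun k hk => h k (List.mem_cons_of_mem a hk)) (op z a)

-- folds of commuting pvBump steps agree on permuted key lists
theorem pv_foldl_perm (d : List (String × Int)) (cf : String → Int)
    {s t : List String} (h : s.Perm t) :
    ∀ z : List Int, s.foldl (fun f k => pvBump f d k (cf k)) z
      = t.foldl (fun f k => pvBump f d k (cf k)) z := by
  induction h with
  | nil => intro z; rfl
  | cons a _ ih => intro z; simp only [List.foldl_cons]; exact ih _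
  | swap a b l => intro z; simp only [List.foldl_cons]; rw [pvBump_comm]
  | trans _ _ ih1 ih2 => intro z; rw [ih1, ih2]

theorem portA_eq (category_list : List String) (category_to_index : List (String × Int)) (vector_size : Int) :
    list_to_frequency_vector category_list category_to_index vector_size
      = (category_list.map pyCapitalize).foldl (fun f k => pvBump f category_to_index k 1)
          (List.replicate vector_size.toNat 0) := by
  unfold list_to_frequency_vector
  rw [List.foldl_map]
  rfl

theorem portB_eq (category_list : List String) (category_to_index : List (String × Int)) (vector_size : Int)
    (hnd : (category_to_index.map Prod.fst).Nodup) :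
    list_to_frequency_vector_alt category_list category_to_index vector_size
      = (category_to_index.map Prod.fst).foldl
          (fun f k => pvBump f category_to_index k ((category_list.map pyCapitalize).count k))
          (List.replicate vector_size.toNat 0) := by
  unfold list_to_frequency_vector_alt
  rw [List.foldl_map,
    PySem.List.foldl_congr_mem category_to_index _
      (fun f kv => pvBump f category_to_index kv.1 ((category_list.map pyCapitalize).count kv.1))
      (List.replicate vector_size.toNat 0)
      (fun acc kv hkv => by
        simp only [PySem.Dict.getD_counter]
        by_cases hc : ((category_list.map pyCapitalize).count kv.1 : Int) = 0
        · rw [if_neg (by simpa using hc), hc, pvBump_zero]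
        · rw [if_pos (by simpa using hc)]
          unfold pvBump
          rw [pv_find_of_mem hnd hkv])]

-- ===== VERDICT (by name: the statement is the Claim_ definition above) =====
theorem list_to_frequency_vector_spec : Claim_equal_list_to_frequency_vector := by
  intro category_list category_to_index vector_size _hdom hpre
  unfold Spec_list_to_frequency_vector
  rw [portA_eq, portB_eq category_list category_to_index vector_size hpre.1, pv_main]
  set caps := category_list.map pyCapitalize with hcaps
  set d := category_to_index with hd
  set z : List Int := List.replicate vector_size.toNat 0 with hz
  -- restrict each fold to the keys shared by the input list and the mapping
  rw [pv_foldl_filter _ (fun k => (d.map Prod.fst).contains k) (PySem.Set.ofList caps)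
        (fun k _ hk f => pvBump_eq_self_of_find_none
          (List.find?_eq_none.mpr (fun p hp hb => by
            have hmem : k ∈ d.map Prod.fst := List.mem_map.mpr ⟨p, hp, by simpa using hb⟩
            have hk' : k ∉ d.map Prod.fst := by
              intro hm; simp only [List.contains_eq_mem, decide_eq_true hm] at hk; cases hk
            exact hk' hmem)) _) z,
      pv_foldl_filter _ (fun k => caps.contains k) (d.map Prod.fst)
        (fun k _ hk f => by
          have hk' : k ∉ caps := by
            intro hm; simp only [List.contains_eq_mem, decide_eq_true hm] at hk; cases hk
          have hc : caps.count k = 0 := List.count_eq_zero.mpr hk'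
          rw [hc]
          simpa using pvBump_zero f d k) z]
  refine pv_foldl_perm d _ ?_ z
  refine List.perm_of_nodup_nodup_toFinset_eq
    ((PySem.Set.nodup_ofList caps).filter _) (hpre.1.filter _) ?_
  ext x
  simp only [List.mem_toFinset, List.mem_filter, PySem.Set.mem_ofList,
    List.contains_iff_mem]
  tauto
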